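-- pv_equiv track=rewrite | github.com/sagyas/google-foobar | 2.2. Bunny Prisoner Locating/solution.py | solution
-- ===== SOURCE A (Python) =====
-- def solution(x, y):
--     lower_bound = y
--     upper_bound = x + y
--     id = 0
--     for i in range(lower_bound, upper_bound):
--         id += i
--     u_bound = y - 1
--     for i in range(1, u_bound):
--         id += i
--     return str(id)
-- ===== SOURCE B (Python) =====
-- def solution(x, y):
--     def range_sum(a, b):
--         # sum of range(a, b) in closed form; empty range sums to 0
--         return (b - a) * (a + b - 1) // 2 if a < b else 0
--     return str(range_sum(y, x + y) + range_sum(1, y - 1))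
-- ===== Notes on version B (the rewrite author's own statement) =====
-- stated objective: faster
-- what changed: Replaced the two summation loops by the closed-form arithmetic-series formula (b-a)*(a+b-1)//2 for each range.
import Mathlib
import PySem

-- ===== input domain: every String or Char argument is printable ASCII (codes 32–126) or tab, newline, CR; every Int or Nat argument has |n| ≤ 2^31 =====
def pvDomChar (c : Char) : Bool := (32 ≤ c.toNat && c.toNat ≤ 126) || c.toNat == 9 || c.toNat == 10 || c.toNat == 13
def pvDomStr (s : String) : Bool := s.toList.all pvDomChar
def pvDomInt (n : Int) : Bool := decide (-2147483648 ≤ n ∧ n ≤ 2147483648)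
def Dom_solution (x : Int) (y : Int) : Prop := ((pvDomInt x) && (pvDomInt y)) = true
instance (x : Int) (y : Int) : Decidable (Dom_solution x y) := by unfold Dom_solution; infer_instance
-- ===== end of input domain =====

-- B replaces A's two O(x+y) summation loops by the closed-form arithmetic-series formula (O(1) arithmetic).
-- ===== PORT A =====
-- Port of A: two explicit summation loops over ranges, accumulated into id.
def solution (x : Int) (y : Int) : String :=
  let lower_bound := y
  let upper_bound := x + y
  let id1 : Int := (PySem.List.pyRange lower_bound upper_bound 1).foldl (fun acc i => acc + i) 0
  let u_bound := y - 1
  let id2 : Int := (PySem.List.pyRange 1 u_bound 1).foldl (fun acc i => acc + i) id1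
  PySem.Int.toStr id2

-- ===== PORT B =====
-- Port of B: closed-form arithmetic-series sum for each range.
def rangeSum (a b : Int) : Int :=
  if a < b then PySem.Int.floordiv ((b - a) * (a + b - 1)) 2 else 0

def solution_alt (x : Int) (y : Int) : String :=
  PySem.Int.toStr (rangeSum y (x + y) + rangeSum 1 (y - 1))

-- ===== PRECONDITION & SPEC =====
def Spec_solution (x : Int) (y : Int) (out : String) : Prop := out = solution_alt x y
instance (x : Int) (y : Int) (out : String) : Decidable (Spec_solution x y out) := by unfold Spec_solution; infer_instance

-- ===== CLAIM (what is proved, stated in full; the proofs are below) =====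
def Claim_equal_solution : Prop := ∀ (x : Int) (y : Int), Dom_solution x y → Spec_solution x y (solution x y)

-- ===== LEMMAS AND PROOFS =====
theorem two_sum_pyRange (n : Nat) (a : Int) :
    2 * (PySem.List.pyRange a (a + n) 1).sum = n * (2 * a + n - 1) := by
  induction n with
  | zero => simp [PySem.List.pyRange_one_eq_nil (le_refl a)]
  | succ k ih =>
    rw [show ((k + 1 : Nat) : Int) = (k : Int) + 1 from by push_cast; ring,
      show a + ((k : Int) + 1) = (a + k) + 1 by ring,
      PySem.List.pyRange_one_succ_right (by omega : a ≤ a + k)]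
    simp only [List.sum_append, List.sum_cons, List.sum_nil]
    linear_combination ih

theorem sum_pyRange (a b : Int) : (PySem.List.pyRange a b 1).sum = rangeSum a b := by
  by_cases h : a < b
  · obtain ⟨n, hn⟩ : ∃ n : Nat, b = a + n := ⟨(b - a).toNat, by omega⟩
    subst hn
    have h2 := two_sum_pyRange n a
    rw [rangeSum, if_pos h, PySem.Int.floordiv_eq_ediv_of_pos (by omega : (0:Int) < 2)]
    have : (a + (n : Int) - a) * (a + (a + n) - 1) = 2 * (PySem.List.pyRange a (a + n) 1).sum := by
      rw [h2]; ring
    rw [this, Int.mul_ediv_cancel_left _ (by omega)]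
  · rw [PySem.List.pyRange_one_eq_nil (by omega), rangeSum, if_neg h]; rfl

theorem foldl_add_id (l : List Int) (a : Int) : l.foldl (fun acc i => acc + i) a = a + l.sum := by
  induction l generalizing a with
  | nil => simp
  | cons h t ih => rw [List.foldl_cons, ih, List.sum_cons]; ring

-- ===== VERDICT (by name: the statement is the Claim_ definition above) =====
theorem solution_spec : Claim_equal_solution := by
  intro x y _
  show solution x y = solution_alt x y
  simp only [solution, solution_alt]
  rw [foldl_add_id, foldl_add_id, sum_pyRange, sum_pyRange]
  congr 1
  ring
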